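-- pv_equiv track=rewrite | github.com/jorgedg6/material-computacion | INTRO A PYTHON/Codigos/9. ListasDeListas/covidcentral.py | maxrel
-- ===== SOURCE A (Python) =====
-- def maxrel(g):
--     np = len(g) #Numero de personas
--
--     maxp = -1 #Numero de la persona con mas rel
--     maxn = -1 #Numero de rels de la persona con mas
--
--     #Para cada persona mirar cuantas relaciones
--     for i in range(0,np):
--
--         #Contar su numero de Trues
--         rel = g[i]
--         numT = 0
--         for r in rel:
--             if r == True:
--                 numT += 1
--
--         #Mirar si es mayor que lo que llevaba
--         if numT > maxn:
--             maxn = numT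
--             maxp = i
--
--     return maxp
-- ===== SOURCE B (Python) =====
-- def maxrel(g):
--     # Rank all row indices by (descending True-count, ascending index); the top of
--     # the ranking is the answer, or -1 for an empty matrix.
--     n = len(g)
--     ranking = sorted(range(n), key=lambda i: (-sum(r == True for r in g[i]), i))
--     return ranking[0] if ranking else -1
-- ===== Notes on version B (the rewrite author's own statement) =====
-- stated objective: alternative
-- what changed: Replaces A's single running-max loop (hand-maintained maxp/maxn) with a sort-based selection: rank all row indices by the lexicographic key (-True-count, index) and return the head of the ranking (-1 if empty).
import Mathlib
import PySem

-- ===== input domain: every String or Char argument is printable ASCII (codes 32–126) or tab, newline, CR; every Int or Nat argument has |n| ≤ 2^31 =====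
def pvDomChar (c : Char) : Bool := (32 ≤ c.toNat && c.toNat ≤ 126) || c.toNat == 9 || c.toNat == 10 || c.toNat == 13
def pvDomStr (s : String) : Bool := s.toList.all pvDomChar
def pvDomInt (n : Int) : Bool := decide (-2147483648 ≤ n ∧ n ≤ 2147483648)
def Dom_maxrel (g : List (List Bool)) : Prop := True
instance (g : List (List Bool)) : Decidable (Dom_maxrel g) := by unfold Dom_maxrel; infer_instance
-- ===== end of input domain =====

-- B replaces A's running-max loop with a sort-based selection: rank the row
-- indices by the lexicographic key (-True-count, index) and take the head
-- (objective: alternative; not faster).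


-- ===== PORT A =====
-- literal transliteration of A: for i in range(0, np): count the Trues of g[i], keep running (maxp, maxn).
-- g[i] is ported as pyGetD g i []: i always lies in range(0, len(g)), so the default is never used (exact).
def maxrel (g : List (List Bool)) : Int :=
  let np : Int := g.length
  let s : Int × Int :=
    (PySem.List.pyRange 0 np 1).foldl
      (fun (s : Int × Int) i =>
        let rel := PySem.List.pyGetD g i []
        let numT := rel.foldl (fun (n : Int) r => if r == true then n + 1 else n) 0
        if numT > s.2 then (i, numT) else s)
      (-1, -1)
  s.1

-- ===== PORT B =====
-- transliteration of Source B: sorted(range(n), key=lambda i: (-count_i, i)), then ranking[0] (or -1 if empty).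
-- Python's tuple key compares lexicographically, which is exactly the order of Lex (Int × Int).
def maxrel_alt (g : List (List Bool)) : Int :=
  let n : Int := g.length
  let ranking :=
    PySem.List.sorted (PySem.List.pyRange 0 n 1)
      (fun i =>
        (toLex (-((PySem.List.pyGetD g i []).map (fun r => if r == true then (1 : Int) else 0)).sum, i)
          : Lex (Int × Int)))
      false
  match ranking with
  | [] => -1
  | h :: _ => h

-- ===== PRECONDITION & SPEC =====
def Spec_maxrel (g : List (List Bool)) (out : Int) : Prop := out = maxrel_alt g
instance (g : List (List Bool)) (out : Int) : Decidable (Spec_maxrel g out) := by unfold Spec_maxrel; infer_instance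

-- ===== CLAIM (what is proved, stated in full; the proofs are below) =====
def Claim_equal_maxrel : Prop := ∀ (g : List (List Bool)), Dom_maxrel g → Spec_maxrel g (maxrel g)

-- ===== LEMMAS AND PROOFS =====

-- the per-row True-count used by both sides
def pvCnt (row : List Bool) : Int := (row.map (fun r => if r == true then (1 : Int) else 0)).sum

-- the inner counting loop of A equals the 0/1 sum
theorem pvCount_eq (row : List Bool) (a : Int) :
    row.foldl (fun (n : Int) r => if r == true then n + 1 else n) a = a + pvCnt row := by
  induction row generalizing a with
  | nil => simp [pvCnt]
  | cons x xs ih =>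
    simp only [List.foldl_cons, pvCnt, List.map_cons, List.sum_cons, ih]
    by_cases hx : x = true
    · simp [hx]; ring
    · simp [hx]

-- every count is nonnegative
theorem pvCount_nonneg (row : List Bool) : 0 ≤ pvCnt row := by
  apply List.sum_nonneg
  intro x hx
  rcases List.mem_map.1 hx with ⟨r, _, rfl⟩
  by_cases h : r = true <;> simp [h]

-- enumerate commutes with map on the values
theorem pvEnumerate_map {α β : Type} (f : α → β) :
    ∀ (xs : List α) (s : Int),
      PySem.List.enumerate (xs.map f) s
        = (PySem.List.enumerate xs s).map (fun p => (p.1, f p.2)) := by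
  intro xs
  induction xs with
  | nil => intro s; simp [PySem.List.enumerate_nil]
  | cons x t ih => intro s; simp [PySem.List.enumerate_cons, ih]

-- characterisation of A's running loop: it ends at the FIRST argmax of the counts
theorem pvFoldE_props :
    ∀ (c : List Int) (i p mn : Int),
      ((PySem.List.enumerate c i).foldl
          (fun (s : Int × Int) (x : Int × Int) => if x.2 > s.2 then (x.1, x.2) else s) (p, mn)
          = (p, mn) ∧ ∀ k : Nat, k < c.length → c.getD k 0 ≤ mn)
      ∨ (∃ k : Nat, k < c.length ∧
          (PySem.List.enumerate c i).foldl
            (fun (s : Int × Int) (x : Int × Int) => if x.2 > s.2 then (x.1, x.2) else s) (p, mn)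
            = (i + k, c.getD k 0) ∧
          mn < c.getD k 0 ∧
          (∀ j : Nat, j < c.length → c.getD j 0 ≤ c.getD k 0) ∧
          (∀ j : Nat, j < k → c.getD j 0 < c.getD k 0)) := by
  intro c
  induction c with
  | nil => intro i p mn; left; simp [PySem.List.enumerate_nil]
  | cons x xs ih =>
    intro i p mn
    rw [PySem.List.enumerate_cons]
    simp only [List.foldl_cons]
    by_cases hx : x > mn
    · rw [if_pos hx]
      rcases ih (i + 1) i x with ⟨he, hall⟩ | ⟨k, hk, he, hlt, hall, hstrict⟩
      · right
        refine ⟨0, by simp, ?_, by simpa using hx, ?_, by omega⟩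
        · simpa using he
        · intro j hj
          cases j with
          | zero => simp
          | succ j' =>
            simp only [List.getD_cons_succ, List.getD_cons_zero]
            exact hall j' (by simpa using hj)
      · right
        refine ⟨k + 1, by simpa using hk, ?_, ?_, ?_, ?_⟩
        · rw [he]; simp only [List.getD_cons_succ]; congr 1; push_cast; ring
        · simp only [List.getD_cons_succ]; omega
        · intro j hj
          cases j with
          | zero => simp only [List.getD_cons_zero, List.getD_cons_succ]; omega
          | succ j' =>
            simp only [List.getD_cons_succ]
            exact hall j' (by simpa using hj)
        · intro j hj
          cases j with
          | zero => simp only [List.getD_cons_zero, List.getD_cons_succ]; omega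
          | succ j' =>
            simp only [List.getD_cons_succ]
            exact hstrict j' (by omega)
    · rw [if_neg hx]
      rcases ih (i + 1) p mn with ⟨he, hall⟩ | ⟨k, hk, he, hlt, hall, hstrict⟩
      · left
        refine ⟨he, ?_⟩
        intro j hj
        cases j with
        | zero => simp only [List.getD_cons_zero]; omega
        | succ j' =>
          simp only [List.getD_cons_succ]
          exact hall j' (by simpa using hj)
      · right
        refine ⟨k + 1, by simpa using hk, ?_, ?_, ?_, ?_⟩
        · rw [he]; simp only [List.getD_cons_succ]; congr 1; push_cast; ring
        · simp only [List.getD_cons_succ]; omega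
        · intro j hj
          cases j with
          | zero => simp only [List.getD_cons_zero, List.getD_cons_succ]; omega
          | succ j' =>
            simp only [List.getD_cons_succ]
            exact hall j' (by simpa using hj)
        · intro j hj
          cases j with
          | zero => simp only [List.getD_cons_zero, List.getD_cons_succ]; omega
          | succ j' =>
            simp only [List.getD_cons_succ]
            exact hstrict j' (by omega)

-- A's loop, rewritten as a fold over the enumerated count table
theorem pvA_eq_foldE (g : List (List Bool)) :
    (PySem.List.pyRange 0 (g.length : Int) 1).foldl
      (fun (s : Int × Int) i =>
        let rel := PySem.List.pyGetD g i []
        let numT := rel.foldl (fun (n : Int) r => if r == true then n + 1 else n) 0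
        if numT > s.2 then (i, numT) else s) (-1, -1)
    = (PySem.List.enumerate (g.map pvCnt) 0).foldl
        (fun (s : Int × Int) (x : Int × Int) => if x.2 > s.2 then (x.1, x.2) else s) (-1, -1) := by
  rw [pvEnumerate_map, PySem.List.enumerate_eq_map_pyRange g ([] : List Bool),
      List.map_map, List.foldl_map, ← PySem.List.len_eq]
  apply List.foldl_ext
  intro a i _
  simp only [Function.comp, pvCount_eq, zero_add]

-- ===== VERDICT (by name: the statement is the Claim_ definition above) =====
theorem maxrel_spec : Claim_equal_maxrel := by
  intro g _
  unfold Spec_maxrel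
  cases hg : g with
  | nil => decide
  | cons row rest =>
    -- abbreviations
    subst hg
    unfold maxrel maxrel_alt
    simp only []
    set c : List Int := (row :: rest).map pvCnt with hc
    have hlen : c.length = (row :: rest).length := by simp [hc]
    -- A's side: first argmax of c
    rw [pvA_eq_foldE]
    rcases pvFoldE_props c 0 (-1) (-1) with ⟨_, hall⟩ | ⟨k, hk, he, _, hall, hstrict⟩
    · exfalso
      have h0 : c.getD 0 0 ≤ -1 := hall 0 (by simp [hc])
      have : c.getD 0 0 = pvCnt row := by simp [hc]
      have := pvCount_nonneg row
      omega
    · rw [he]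
      simp only [zero_add]
      -- B's side
      set key : Int → Lex (Int × Int) :=
        fun i =>
          (toLex (-((PySem.List.pyGetD (row :: rest) i []).map
              (fun r => if r == true then (1 : Int) else 0)).sum, i) : Lex (Int × Int)) with hkey
      have hnil : (0 : Int) < ((row :: rest).length : Int) := by simp
      have hne : PySem.List.sorted (PySem.List.pyRange 0 ((row :: rest).length : Int) 1) key false ≠ [] := by
        rw [Ne, PySem.List.sorted_eq_nil_iff]
        rw [PySem.List.pyRange_one_cons hnil]
        simp
      rcases hs : PySem.List.sorted (PySem.List.pyRange 0 ((row :: rest).length : Int) 1) key false with _ | ⟨h, t⟩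
      · exact absurd hs hne
      · -- head membership and minimality
        have hmem : h ∈ PySem.List.pyRange 0 ((row :: rest).length : Int) 1 := by
          rw [← PySem.List.mem_sorted _ key false, hs]
          exact List.mem_cons_self
        have hrange := PySem.List.mem_pyRange_one.1 hmem
        have hminAll := PySem.List.key_head_sorted_le _ key hs
        -- key value at an in-range index j equals (-(c[j]), j)
        have hkey_at : ∀ j : Nat, j < (row :: rest).length →
            key (j : Int) = (toLex (-(c.getD j 0), (j : Int)) : Lex (Int × Int)) := by
          intro j hj
          have h1 : PySem.List.pyGetD (row :: rest) (j : Int) [] = (row :: rest).getD j [] := by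
            simp [PySem.List.pyGetD_natCast]
          have h2 : c.getD j 0 = pvCnt ((row :: rest).getD j []) := by
            rw [hc, List.getD_eq_getElem _ _ (by simpa [hlen] using hj),
                List.getD_eq_getElem _ _ hj, List.getElem_map]
          rw [hkey]
          simp only [h1, h2, pvCnt]
        -- h as a natural number
        have hhnat : h = ((h.toNat : Nat) : Int) := by omega
        have hhlt : h.toNat < (row :: rest).length := by omega
        -- B's head dominates every count, strictly so for earlier indices
        have hBall : ∀ j : Nat, j < (row :: rest).length → c.getD j 0 ≤ c.getD h.toNat 0 := by
          intro j hj
          have := hminAll (j : Int) (PySem.List.mem_pyRange_one.2 ⟨by omega, by exact_mod_cast hj⟩)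
          rw [hhnat, hkey_at _ hhlt, hkey_at _ hj] at this
          rcases Prod.Lex.toLex_le_toLex.1 this with h1 | ⟨h1, _⟩ <;> omega
        have hBstrict : ∀ j : Nat, j < h.toNat → c.getD j 0 < c.getD h.toNat 0 := by
          intro j hj
          have hjl : j < (row :: rest).length := by omega
          have := hminAll (j : Int) (PySem.List.mem_pyRange_one.2 ⟨by omega, by exact_mod_cast hjl⟩)
          rw [hhnat, hkey_at _ hhlt, hkey_at _ hjl] at this
          rcases Prod.Lex.toLex_le_toLex.1 this with h1 | ⟨h1, h2⟩
          · omega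
          · exfalso; omega
        -- uniqueness of the first argmax: k = h.toNat
        have hklen : k < (row :: rest).length := by omega
        have hkh : k = h.toNat := by
          rcases Nat.lt_trichotomy k h.toNat with hlt' | heq | hgt
          · have := hBstrict k hlt'
            have := hall h.toNat (by omega)
            omega
          · exact heq
          · have := hstrict h.toNat hgt
            have := hBall k hklen
            omega
        have hmatch : (match h :: t with | [] => (-1 : Int) | x :: _ => x) = h := rfl
        rw [hmatch, hkh]
        omega
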